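-- pv_equiv track=rewrite | github.com/Arbazgithouse/arbazproject | parse_xml_file.py | distribute_classnames
-- ===== SOURCE A (Python) =====
-- def distribute_classnames(class_time_dict):
--     sorted_classes = sorted(class_time_dict.items(), key=lambda x: x[1], reverse=True)
--     groups = [[] for _ in range(5)]
--     group_times = [0] * 5
--
--     for class_name, time in sorted_classes:
--         min_group_index = group_times.index(min(group_times))
--         groups[min_group_index].append((class_name, time))
--         group_times[min_group_index] += time
--
--     return groups
-- ===== SOURCE B (Python) =====
-- def distribute_classnames(class_time_dict):
--     sorted_classes = sorted(class_time_dict.items(), key=lambda x: x[1], reverse=True)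
--     groups = [[] for _ in range(5)]
--     # priority queue of (current_total_time, group_index), kept sorted ascending;
--     # the front is always the least-loaded group (lowest index on ties).
--     pq = [(0, i) for i in range(5)]
--     for class_name, time in sorted_classes:
--         t, i = pq.pop(0)
--         groups[i].append((class_name, time))
--         entry = (t + time, i)
--         j = 0
--         while j < len(pq) and pq[j] < entry:
--             j += 1
--         pq.insert(j, entry)
--     return groups
-- ===== Notes on version B (the rewrite author's own statement) =====
-- stated objective: alternative
-- what changed: Replaces the per-class argmin scan over the group-times array (min + list.index) with a sorted priority queue of (time, index) pairs: pop the front for the least-loaded group and re-insert the updated pair in order; the (time, index) tuple order reproduces A's lowest-index tie-break.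
import Mathlib
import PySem

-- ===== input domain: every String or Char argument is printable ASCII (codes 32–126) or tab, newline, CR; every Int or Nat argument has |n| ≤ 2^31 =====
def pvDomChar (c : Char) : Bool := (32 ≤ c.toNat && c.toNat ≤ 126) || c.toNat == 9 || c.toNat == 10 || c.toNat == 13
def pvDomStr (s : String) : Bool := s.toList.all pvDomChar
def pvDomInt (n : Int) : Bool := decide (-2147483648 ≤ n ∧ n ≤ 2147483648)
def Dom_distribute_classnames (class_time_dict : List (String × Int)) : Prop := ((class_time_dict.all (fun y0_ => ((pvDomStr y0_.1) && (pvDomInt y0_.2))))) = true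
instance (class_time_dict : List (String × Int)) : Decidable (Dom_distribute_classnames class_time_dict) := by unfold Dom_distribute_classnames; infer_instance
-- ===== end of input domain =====

-- B replaces A's per-class argmin scan (min + list.index over group_times) with a sorted
-- priority queue of (time, index) pairs: alternative decomposition, same cost.

-- ===== PORT A =====
-- for class_name, time in sorted_classes: argmin scan, append, bump time.
-- min(group_times)/index never fail (group_times always nonempty), so .getD 0 is unreachable.
def distribute_classnames (class_time_dict : List (String × Int)) : List (List (String × Int)) :=
  let sorted_classes := PySem.List.sorted class_time_dict (fun x => x.2) true
  let st := sorted_classes.foldl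
    (fun (st : List (List (String × Int)) × List Int) c =>
      let m := (PySem.List.min? st.2 (fun x => x)).getD 0
      let j := (PySem.List.index? st.2 m).getD 0
      (st.1.modify j (· ++ [c]), st.2.modify j (· + c.2)))
    (List.replicate 5 [], List.replicate 5 0)
  st.1

-- ===== PORT B =====
-- pq.insert(j, entry) with j found by the while loop 'while pq[j] < entry': insert
-- before the first element not tuple-less-than entry (Python lexicographic tuple <).
def pqInsertB (e : Int × Nat) : List (Int × Nat) → List (Int × Nat)
  | [] => [e]
  | x :: xs => if x.1 < e.1 ∨ (x.1 = e.1 ∧ x.2 < e.2) then x :: pqInsertB e xs else e :: x :: xs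

-- t, i = pq.pop(0); pq is always nonempty (5 entries), so the [] branch is unreachable.
def distribute_classnames_alt (class_time_dict : List (String × Int)) : List (List (String × Int)) :=
  let sorted_classes := PySem.List.sorted class_time_dict (fun x => x.2) true
  let st := sorted_classes.foldl
    (fun (st : List (List (String × Int)) × List (Int × Nat)) c =>
      match st.2 with
      | [] => st
      | (t, i) :: rest => (st.1.modify i (· ++ [c]), pqInsertB (t + c.2, i) rest))
    (List.replicate 5 [], (List.range 5).map (fun i => ((0 : Int), i)))
  st.1

-- ===== PRECONDITION & SPEC =====
def Spec_distribute_classnames (class_time_dict : List (String × Int)) (out : List (List (String × Int))) : Prop := out = distribute_classnames_alt class_time_dict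
instance (class_time_dict : List (String × Int)) (out : List (List (String × Int))) : Decidable (Spec_distribute_classnames class_time_dict out) := by unfold Spec_distribute_classnames; infer_instance

-- ===== CLAIM (what is proved, stated in full; the proofs are below) =====
def Claim_equal_distribute_classnames : Prop := ∀ (class_time_dict : List (String × Int)), Dom_distribute_classnames class_time_dict → Spec_distribute_classnames class_time_dict (distribute_classnames class_time_dict)

-- ===== LEMMAS AND PROOFS =====

-- lexicographic ≤ on (time, index) pairs
def pqLE (x y : Int × Nat) : Prop := x.1 < y.1 ∨ (x.1 = y.1 ∧ x.2 ≤ y.2)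

theorem pqLE_refl (x : Int × Nat) : pqLE x x := Or.inr ⟨rfl, le_refl _⟩

theorem pqInsertB_perm (e : Int × Nat) (l : List (Int × Nat)) :
    (pqInsertB e l).Perm (e :: l) := by
  induction l with
  | nil => simp [pqInsertB]
  | cons x xs ih =>
    simp only [pqInsertB]
    split_ifs with h
    · exact ((ih.cons x).trans (List.Perm.swap e x xs))
    · exact List.Perm.refl _

theorem pqLE_trans {x y z : Int × Nat} (h1 : pqLE x y) (h2 : pqLE y z) : pqLE x z := by
  rcases h1 with h1 | ⟨h1, h1'⟩ <;> rcases h2 with h2 | ⟨h2, h2'⟩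
  · exact Or.inl (lt_trans h1 h2)
  · exact Or.inl (h2 ▸ h1)
  · exact Or.inl (h1 ▸ h2)
  · exact Or.inr ⟨h1.trans h2, Nat.le_trans h1' h2'⟩

theorem pqLE_of_not_lt {x e : Int × Nat} (h : ¬(x.1 < e.1 ∨ (x.1 = e.1 ∧ x.2 < e.2))) :
    pqLE e x := by
  rcases not_or.mp h with ⟨h1, h2⟩
  rcases lt_or_eq_of_le (not_lt.mp h1) with h3 | h3
  · exact Or.inl h3
  · exact Or.inr ⟨h3, not_lt.mp (fun h4 => h2 ⟨h3.symm, h4⟩)⟩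

theorem pqInsertB_sorted (e : Int × Nat) (l : List (Int × Nat))
    (hs : l.Pairwise pqLE) : (pqInsertB e l).Pairwise pqLE := by
  induction l with
  | nil => simp [pqInsertB, List.pairwise_cons]
  | cons x xs ih =>
    rcases List.pairwise_cons.mp hs with ⟨hx, hxs⟩
    simp only [pqInsertB]
    split_ifs with h
    · refine List.pairwise_cons.mpr ⟨?_, ih hxs⟩
      intro y hy
      rcases List.mem_cons.mp ((pqInsertB_perm e xs).mem_iff.mp hy) with rfl | hy'
      · rcases h with h1 | ⟨h1, h2⟩
        · exact Or.inl h1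
        · exact Or.inr ⟨h1, Nat.le_of_lt h2⟩
      · exact hx y hy'
    · have hex : pqLE e x := pqLE_of_not_lt h
      refine List.pairwise_cons.mpr ⟨?_, hs⟩
      intro y hy
      rcases List.mem_cons.mp hy with rfl | hy'
      · exact hex
      · exact pqLE_trans hex (hx y (by assumption))

-- zipIdx of a list with index j modified
theorem zipIdx_modify (ts : List Int) (j : Nat) (f : Int → Int) :
    (ts.modify j f).zipIdx = ts.zipIdx.modify j (fun p => (f p.1, p.2)) := by
  apply List.ext_getElem
  · simp [List.length_zipIdx, List.length_modify]
  · intro i h1 h2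
    have hi : i < ts.length := by simpa [List.length_zipIdx, List.length_modify] using h1
    have hz : i < ts.zipIdx.length := by simpa [List.length_zipIdx] using hi
    rw [List.getElem_zipIdx, List.getElem_modify, List.getElem_modify, List.getElem_zipIdx]
    by_cases hij : j = i <;> simp [hij]

theorem modify_append_cons {α : Type} (P : List α) (x : α) (S : List α) (g : α → α) :
    (P ++ x :: S).modify P.length g = P ++ g x :: S := by
  induction P with
  | nil => simp
  | cons p ps ih => simpa [List.modify_succ_cons] using ih

-- The key step lemma: with pq a sorted permutation of zipIdx ts and head (m, j),
-- A picks value m at index j, and both updated states stay related.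
theorem step_core (ts : List Int) (m : Int) (j : Nat) (tl : List (Int × Nat)) (time : Int)
    (hp : ((m, j) :: tl).Perm ts.zipIdx) (hs : ((m, j) :: tl).Pairwise pqLE) :
    (PySem.List.min? ts (fun x => x)).getD 0 = m ∧
    (PySem.List.index? ts m).getD 0 = j ∧
    (pqInsertB (m + time, j) tl).Perm (ts.modify j (· + time)).zipIdx ∧
    (pqInsertB (m + time, j) tl).Pairwise pqLE := by
  have hmemz : (m, j) ∈ ts.zipIdx := hp.subset (List.mem_cons_self ..)
  have hgj : ts[j]? = some m := List.mk_mem_zipIdx_iff_getElem?.mp hmemz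
  obtain ⟨hjlt, hgje⟩ := List.getElem?_eq_some_iff.mp hgj
  have hhead : ∀ y ∈ (m, j) :: tl, pqLE (m, j) y := by
    intro y hy
    rcases hy with _ | hy'
    · exact pqLE_refl _
    · exact (List.pairwise_cons.mp hs).1 y (by assumption)
  have hall : ∀ i (hi : i < ts.length), m ≤ ts[i] ∧ (ts[i] = m → j ≤ i) := by
    intro i hi
    have hz : (ts[i], i) ∈ ts.zipIdx :=
      List.mk_mem_zipIdx_iff_getElem?.mpr (List.getElem?_eq_getElem hi)
    have hle : pqLE (m, j) (ts[i], i) := hhead _ (hp.symm.subset hz)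
    rcases hle with h1 | ⟨h1, h2⟩
    · exact ⟨le_of_lt h1, fun he => absurd (he ▸ h1) (lt_irrefl m)⟩
    · exact ⟨le_of_eq h1, fun _ => h2⟩
  -- min
  have hmin : (PySem.List.min? ts (fun x => x)).getD 0 = m := by
    have hne : ts ≠ [] := fun h => by subst h; exact absurd hjlt (by simp)
    rcases ho : PySem.List.min? ts (fun x => x) with _ | m'
    · exact absurd ((PySem.List.min?_eq_none_iff ts _).mp ho) hne
    · have hm'mem : m' ∈ ts := PySem.List.min?_mem ho
      have h1 : m' ≤ m := PySem.List.min?_isMin ho m (hgje ▸ List.getElem_mem hjlt)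
      have h2 : m ≤ m' := by
        rcases List.mem_iff_getElem.mp hm'mem with ⟨i, hi, rfl⟩
        exact (hall i hi).1
      simpa using le_antisymm h1 h2
  -- index
  have hidx : (PySem.List.index? ts m).getD 0 = j := by
    have : PySem.List.index? ts m = some j := by
      rw [PySem.List.index?_eq_some_iff]
      refine ⟨ts.take j, ts.drop (j + 1), ?_, ?_, ?_⟩
      · conv_lhs => rw [← List.take_append_drop j ts]
        rw [← List.getElem_cons_drop hjlt, hgje]
      · rw [List.length_take]; omega
      · intro hmem
        rcases List.mem_take_iff_getElem.mp hmem with ⟨i, hi, hie⟩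
        have hij : i < j := lt_of_lt_of_le hi (Nat.min_le_left ..)
        have hin : i < ts.length := lt_trans hij hjlt
        exact absurd ((hall i hin).2 hie) (not_le.mpr hij)
    rw [this]; rfl
  -- decompose zipIdx ts around position j
  have hzlen : j < ts.zipIdx.length := by simpa [List.length_zipIdx] using hjlt
  have hzj : ts.zipIdx[j] = (m, j) := by rw [List.getElem_zipIdx]; simp [hgje]
  have hzdec : ts.zipIdx = ts.zipIdx.take j ++ (m, j) :: ts.zipIdx.drop (j + 1) := by
    conv_lhs => rw [← List.take_append_drop j ts.zipIdx]
    rw [← List.getElem_cons_drop hzlen, hzj]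
  have htakelen : (ts.zipIdx.take j).length = j := by
    rw [List.length_take]; omega
  have hpm : ts.zipIdx.Perm ((m, j) :: (ts.zipIdx.take j ++ ts.zipIdx.drop (j + 1))) := by
    conv_lhs => rw [hzdec]
    exact List.perm_middle
  have htl : tl.Perm (ts.zipIdx.take j ++ ts.zipIdx.drop (j + 1)) :=
    List.Perm.cons_inv (hp.trans hpm)
  have hmodeq : (ts.modify j (· + time)).zipIdx
      = ts.zipIdx.take j ++ (m + time, j) :: ts.zipIdx.drop (j + 1) := by
    rw [zipIdx_modify]
    conv_lhs => rw [hzdec]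
    have := modify_append_cons (ts.zipIdx.take j) (m, j) (ts.zipIdx.drop (j + 1))
      (fun p => (p.1 + time, p.2))
    rw [htakelen] at this
    exact this
  have hperm' : (pqInsertB (m + time, j) tl).Perm (ts.modify j (· + time)).zipIdx := by
    refine (pqInsertB_perm _ _).trans ?_
    rw [hmodeq]
    exact ((htl.cons (m + time, j)).trans List.perm_middle.symm)
  exact ⟨hmin, hidx, hperm', pqInsertB_sorted _ _ (List.pairwise_cons.mp hs).2⟩

-- loop lemma: the two folds keep equal group lists
theorem loop_eq (cs : List (String × Int)) :
    ∀ (groups : List (List (String × Int))) (ts : List Int) (pq : List (Int × Nat)),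
    ts ≠ [] → pq.Perm ts.zipIdx → pq.Pairwise pqLE →
    (cs.foldl
      (fun (st : List (List (String × Int)) × List Int) c =>
        let m := (PySem.List.min? st.2 (fun x => x)).getD 0
        let j := (PySem.List.index? st.2 m).getD 0
        (st.1.modify j (· ++ [c]), st.2.modify j (· + c.2)))
      (groups, ts)).1
    = (cs.foldl
      (fun (st : List (List (String × Int)) × List (Int × Nat)) c =>
        match st.2 with
        | [] => st
        | (t, i) :: rest => (st.1.modify i (· ++ [c]), pqInsertB (t + c.2, i) rest))
      (groups, pq)).1 := by
  induction cs with
  | nil => intro groups ts pq _ _ _; rfl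
  | cons c cs ih =>
    intro groups ts pq hne hp hs
    match hpq : pq with
    | [] =>
      exact absurd (hp.symm.trans (by simp)).eq_nil (by simp [hne])
    | (t, i) :: rest =>
      obtain ⟨h1, h2, h3, h4⟩ := step_core ts t i rest c.2 hp hs
      simp only [List.foldl_cons, h1, h2]
      exact ih (groups.modify i (· ++ [c])) (ts.modify i (· + c.2)) _
        (by
          intro h
          have h2 := congrArg List.length h
          simp [List.length_modify] at h2
          exact hne h2)
        h3 h4

-- ===== VERDICT (by name: the statement is the Claim_ definition above) =====
theorem distribute_classnames_spec : Claim_equal_distribute_classnames := by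
  intro d _
  unfold Spec_distribute_classnames distribute_classnames distribute_classnames_alt
  exact loop_eq (PySem.List.sorted d (fun x => x.2) true)
    (List.replicate 5 []) (List.replicate 5 0) ((List.range 5).map (fun i => ((0 : Int), i)))
    (by decide) (by decide)
    (by simp [List.range_succ, List.pairwise_cons, pqLE])
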